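-- pv_equiv track=rewrite | github.com/raulandrei00/Polytechnique_L1 | intro to python/wordgame.py | is_constructable2
-- ===== SOURCE A (Python) =====
-- def is_constructable (target , source):
--     ok = True
--     for let in target:
--         if source.count(let) < target.count(let):
--             ok = False
--     return ok
--
-- def cringe (let):
--     if let == 'q':
--         return 'Q'
--     if let == 'w':
--         return 'W'
--     if let == 'e':
--         return 'E'
--     if let == 'r':
--         return 'R'
--     if let == 't':
--         return 'T'
--     if let == 'y':
--         return 'Y'
--     if let == 'u':
--         return 'U'
--     if let == 'i':
--         return 'I'
--     if let == 'o':
--         return 'O'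
--     if let == 'p':
--         return 'P'
--     if let == 'a':
--         return 'A'
--     if let == 's':
--         return 'S'
--     if let == 'd':
--         return 'D'
--     if let == 'f':
--         return 'F'
--     if let == 'g':
--         return 'G'
--     if let == 'h':
--         return 'H'
--     if let == 'j':
--         return 'J'
--     if let == 'k':
--         return 'K'
--     if let == 'l':
--         return 'L'
--     if let == 'z':
--         return 'Z'
--     if let == 'x':
--         return 'X'
--     if let == 'c':
--         return 'C'
--     if let == 'v':
--         return 'V'
--     if let == 'b':
--         return 'B'
--     if let == 'n':
--         return 'N'
--     if let == 'm':
--         return 'M'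
--
-- def is_constructable2(target, source):
--     need = dict()
--     if (not is_constructable(target , source)):
--         return None
--     else:
--         for let in target:
--             need[let] = 0
--         for let in source:
--             need[let] = 0
--         for let in target:
--             need[let] = need[let] + 1
--         ret = str()
--         for let in source:
--             if need[let] > 0:
--                 ret += cringe(let)
--                 need[let] = need[let] - 1
--             else:
--                 ret += let
--         return ret
-- ===== SOURCE B (Python) =====
-- def is_constructable2(target, source):
--     if any(source.count(c) < target.count(c) for c in target):
--         return None
--     return "".join(
--         c.upper() if source[:i].count(c) < target.count(c) else c
--         for i, c in enumerate(source)
--     )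
-- ===== Notes on version B (the rewrite author's own statement) =====
-- stated objective: simpler
-- what changed: B is stateless: instead of A's mutable need-dict initialised in three passes and decremented while scanning source, B decides each output character by a closed per-position formula (uppercase source[i] iff the count of that character in source[:i] is below its count in target) inside a single comprehension, with an any() generator for the feasibility check and str.upper instead of the 26-branch letter map.
import Mathlib
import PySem

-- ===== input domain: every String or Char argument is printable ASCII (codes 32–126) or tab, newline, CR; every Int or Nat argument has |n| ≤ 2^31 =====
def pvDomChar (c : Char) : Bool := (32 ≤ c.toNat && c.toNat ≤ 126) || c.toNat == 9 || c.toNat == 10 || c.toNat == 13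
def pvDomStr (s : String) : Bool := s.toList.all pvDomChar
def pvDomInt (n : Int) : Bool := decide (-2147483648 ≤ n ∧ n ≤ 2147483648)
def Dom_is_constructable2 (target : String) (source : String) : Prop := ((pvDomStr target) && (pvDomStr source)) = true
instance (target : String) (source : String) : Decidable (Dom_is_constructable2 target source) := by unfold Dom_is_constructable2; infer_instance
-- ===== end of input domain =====

-- B replaces A's mutable need-dict (three initialisation passes + a decrementing scan) by a
-- stateless per-position formula (uppercase source[i] iff source[:i] holds fewer copies of that
-- character than target does); equivalence of return values is proved on Pre_ below (A raises
-- TypeError outside it).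

-- ===== PORT A =====
-- helper cringe: Python returns None (no value) for any character outside 'a'..'z'
def pvCringe (c : Char) : Option Char :=
  if c = 'q' then some 'Q' else
  if c = 'w' then some 'W' else
  if c = 'e' then some 'E' else
  if c = 'r' then some 'R' else
  if c = 't' then some 'T' else
  if c = 'y' then some 'Y' else
  if c = 'u' then some 'U' else
  if c = 'i' then some 'I' else
  if c = 'o' then some 'O' else
  if c = 'p' then some 'P' else
  if c = 'a' then some 'A' else
  if c = 's' then some 'S' else
  if c = 'd' then some 'D' else
  if c = 'f' then some 'F' else
  if c = 'g' then some 'G' else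
  if c = 'h' then some 'H' else
  if c = 'j' then some 'J' else
  if c = 'k' then some 'K' else
  if c = 'l' then some 'L' else
  if c = 'z' then some 'Z' else
  if c = 'x' then some 'X' else
  if c = 'c' then some 'C' else
  if c = 'v' then some 'V' else
  if c = 'b' then some 'B' else
  if c = 'n' then some 'N' else
  if c = 'm' then some 'M' else none

-- helper is_constructable: 'source.count(let) / target.count(let)' on the 1-char string [let]
def pvIsConstructable (target source : List Char) : Bool :=
  target.foldl (fun ok l =>
    if PySem.Chars.count source [l] < PySem.Chars.count target [l] then false else ok) true

-- the body of A's last loop; 'need[let]' is always present there, so getD is exact;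
-- none = the TypeError Python raises on 'ret += cringe(let)' when cringe returns None
def pvStepA (st : Option (PySem.Dict Char Int × List Char)) (c : Char) :
    Option (PySem.Dict Char Int × List Char) :=
  match st with
  | none => none
  | some (d, ret) =>
    if d.getD c 0 > 0 then
      match pvCringe c with
      | none => none
      | some u => some (d.insert c (d.getD c 0 - 1), ret ++ [u])
    else some (d, ret ++ [c])

def is_constructable2 (target : String) (source : String) : Option String :=
  if !pvIsConstructable target.toList source.toList then none
  else
    -- need[let]=0 over target, then source, then +1 over target ('need[let]+1': key present, getD exact)
    match source.toList.foldl pvStepA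
      (some (target.toList.foldl (fun d c => d.insert c (d.getD c 0 + 1))
        (source.toList.foldl (fun d c => d.insert c 0)
          (target.toList.foldl (fun d c => d.insert c 0)
            (PySem.Dict.empty : PySem.Dict Char Int))), [])) with
    | none => none
    | some (_, ret) => some (String.ofList ret)

-- ===== PORT B =====
-- 'any(source.count(c) < target.count(c) for c in target)'; then the stateless comprehension:
-- for each (i, c) in enumerate(source), 'c.upper() if source[:i].count(c) < target.count(c) else c'
-- (str.count of a 1-char needle = Chars.count on the singleton; source[:i] = slice to i; c.upper()
-- of a single Dom character = Chars.upperChar)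
def is_constructable2_alt (target : String) (source : String) : Option String :=
  if target.toList.any (fun c =>
      PySem.Chars.count source.toList [c] < PySem.Chars.count target.toList [c]) then none
  else some (String.ofList ((PySem.List.enumerate source.toList).map (fun p =>
    if PySem.Chars.count (PySem.List.slice source.toList none (some p.1)) [p.2]
        < PySem.Chars.count target.toList [p.2]
    then PySem.Chars.upperChar p.2 else p.2)))

-- ===== PRECONDITION & SPEC =====
-- Pre_ excludes exactly the inputs on which A raises TypeError: target constructable from
-- source but containing a character outside 'a'..'z' (cringe returns None, 'ret += None' fails).
def Pre_is_constructable2 (target : String) (source : String) : Prop :=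
  (target.toList.all fun c => !(decide (source.toList.count c < target.toList.count c))) = true →
  (target.toList.all fun c => decide ('a' ≤ c) && decide (c ≤ 'z')) = true
instance (target : String) (source : String) : Decidable (Pre_is_constructable2 target source) := by
  unfold Pre_is_constructable2; infer_instance
def pvWitness_is_constructable2 : String × String := ("ab", "bca")

def Spec_is_constructable2 (target : String) (source : String) (out : Option String) : Prop :=
  out = is_constructable2_alt target source
instance (target : String) (source : String) (out : Option String) : Decidable (Spec_is_constructable2 target source out) := by unfold Spec_is_constructable2; infer_instance

-- ===== CLAIM (what is proved, stated in full; the proofs are below) =====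
def Claim_equal_is_constructable2 : Prop := ∀ (target : String) (source : String), Dom_is_constructable2 target source → Pre_is_constructable2 target source → Spec_is_constructable2 target source (is_constructable2 target source)

-- ===== LEMMAS AND PROOFS =====

-- str.count with a single-character needle is List.count
lemma pvGoCount (c : Char) : ∀ (l : List Char) (fuel acc : ℕ), l.length ≤ fuel →
    PySem.Chars.count.go [c] fuel l acc = acc + l.count c := by
  intro l
  induction l with
  | nil => intro fuel acc h; cases fuel <;> simp [PySem.Chars.count.go]
  | cons a t ih =>
    intro fuel acc h
    cases fuel with
    | zero => simp at h
    | succ f =>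
      rw [PySem.Chars.count.go]
      by_cases hc : c = a
      · subst hc
        simp only [List.isPrefixOf, BEq.rfl, Bool.and_true, if_true,
          List.length_singleton, List.drop_succ_cons, List.drop_zero]
        rw [ih f (acc + 1) (by simpa using h)]
        simp
        omega
      · simp only [List.isPrefixOf, Bool.and_true, beq_iff_eq, hc, if_false]
        rw [ih f acc (by simpa using Nat.le_of_succ_le_succ h)]
        simp [Ne.symm hc]

lemma pvCountSingleton (s : List Char) (c : Char) : PySem.Chars.count s [c] = s.count c := by
  simpa [PySem.Chars.count] using pvGoCount c s s.length 0 le_rfl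

lemma pvFoldlIfFalse {α : Type} (p : α → Prop) [DecidablePred p] :
    ∀ (l : List α) (b : Bool),
      l.foldl (fun ok x => if p x then false else ok) b = (b && l.all (fun x => !decide (p x))) := by
  intro l
  induction l with
  | nil => intro b; simp
  | cons a t ih =>
    intro b
    simp only [List.foldl_cons, List.all_cons, ih]
    by_cases h : p a <;> simp [h]

lemma pvIsConstructableIff (t s : List Char) :
    pvIsConstructable t s = true ↔ ∀ c ∈ t, ¬ (s.count c < t.count c) := by
  unfold pvIsConstructable
  simp only [pvCountSingleton]
  rw [pvFoldlIfFalse (fun l => s.count l < t.count l) t true]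
  simp

lemma pvZeroFold : ∀ (l : List Char) (d : PySem.Dict Char Int),
    (∀ c, d.getD c 0 = 0) →
    ∀ c, (l.foldl (fun d x => d.insert x 0) d).getD c 0 = 0 := by
  intro l
  induction l with
  | nil => intro d h c; simpa using h c
  | cons a t ih =>
    intro d h c
    simp only [List.foldl_cons]
    refine ih _ (fun c' => ?_) c
    rw [PySem.Dict.getD_insert]
    split <;> simp [h]

-- A's need dict after its three initialisation loops counts the target characters
lemma pvNeedA (t s : List Char) (c : Char) :
    ((t.foldl (fun d c => d.insert c (d.getD c 0 + 1))
      (s.foldl (fun d c => d.insert c 0)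
        (t.foldl (fun d c => d.insert c 0) (PySem.Dict.empty : PySem.Dict Char Int))))).getD c 0
    = t.count c := by
  rw [PySem.Dict.getD_foldl_insert_add_one]
  have h0 : ∀ c', ((t.foldl (fun d c => d.insert c 0)
      (PySem.Dict.empty : PySem.Dict Char Int))).getD c' 0 = 0 := by
    refine pvZeroFold t _ (fun c' => ?_)
    simp [pysem]
  rw [pvZeroFold s _ h0 c]
  simp

lemma pvCringeLower (c : Char) (h1 : 'a' ≤ c) (h2 : c ≤ 'z') :
    pvCringe c = some (PySem.Chars.upperChar c) := by
  have hv : 97 ≤ c.toNat ∧ c.toNat ≤ 122 := by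
    constructor
    · exact UInt32.le_iff_toNat_le.mp h1
    · exact UInt32.le_iff_toNat_le.mp h2
  have henum : c.toNat = 97 ∨ c.toNat = 98 ∨ c.toNat = 99 ∨ c.toNat = 100 ∨ c.toNat = 101 ∨
      c.toNat = 102 ∨ c.toNat = 103 ∨ c.toNat = 104 ∨ c.toNat = 105 ∨ c.toNat = 106 ∨
      c.toNat = 107 ∨ c.toNat = 108 ∨ c.toNat = 109 ∨ c.toNat = 110 ∨ c.toNat = 111 ∨
      c.toNat = 112 ∨ c.toNat = 113 ∨ c.toNat = 114 ∨ c.toNat = 115 ∨ c.toNat = 116 ∨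
      c.toNat = 117 ∨ c.toNat = 118 ∨ c.toNat = 119 ∨ c.toNat = 120 ∨ c.toNat = 121 ∨
      c.toNat = 122 := by omega
  rcases henum with h|h|h|h|h|h|h|h|h|h|h|h|h|h|h|h|h|h|h|h|h|h|h|h|h|h <;>
    (have hc := (Char.ofNat_toNat c).symm; rw [h] at hc; subst hc; decide)

-- the per-position marking B computes, phrased as a recursion over the remaining suffix
-- carrying the already-seen prefix (proof helper only)
def pvOut (t : List Char) : List Char → List Char → List Char
  | _, [] => []
  | pre, c :: r =>
    (if pre.count c < t.count c then PySem.Chars.upperChar c else c) :: pvOut t (pre ++ [c]) r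

-- A's output loop computes pvOut whenever the dict holds the still-needed counts and every
-- target character is lowercase
lemma pvLoopOut (t : List Char) (hLow : ∀ c ∈ t, 'a' ≤ c ∧ c ≤ 'z') :
    ∀ (s2 pre ret : List Char) (d : PySem.Dict Char Int),
      (∀ c, d.getD c 0 = max ((t.count c : Int) - pre.count c) 0) →
      ∃ d', s2.foldl pvStepA (some (d, ret)) = some (d', ret ++ pvOut t pre s2) := by
  intro s2
  induction s2 with
  | nil => intro pre ret d _; exact ⟨d, by simp [pvOut]⟩
  | cons c r ih =>
    intro pre ret d hinv
    simp only [List.foldl_cons, pvOut]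
    by_cases hlt : pre.count c < t.count c
    · have hpos : d.getD c 0 > 0 := by rw [hinv c]; omega
      have hct : c ∈ t := List.count_pos_iff.mp (by omega)
      have hlc := hLow c hct
      have hstep : pvStepA (some (d, ret)) c =
          some (d.insert c (d.getD c 0 - 1), ret ++ [PySem.Chars.upperChar c]) := by
        simp [pvStepA, hpos, pvCringeLower c hlc.1 hlc.2]
      rw [hstep]
      obtain ⟨d', hd'⟩ := ih (pre ++ [c]) (ret ++ [PySem.Chars.upperChar c])
        (d.insert c (d.getD c 0 - 1)) (fun c' => by
          rw [PySem.Dict.getD_insert]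
          by_cases hcc : c' = c
          · subst hcc; simp [hinv c', List.count_append]; omega
          · simp [hcc, hinv c', List.count_append, Ne.symm hcc])
      exact ⟨d', by rw [hd']; simp [hlt]⟩
    · have hz : ¬ d.getD c 0 > 0 := by rw [hinv c]; omega
      have hstep : pvStepA (some (d, ret)) c = some (d, ret ++ [c]) := by
        simp [pvStepA, hz]
      rw [hstep]
      obtain ⟨d', hd'⟩ := ih (pre ++ [c]) (ret ++ [c]) d (fun c' => by
        by_cases hcc : c' = c
        · subst hcc; rw [hinv c']; simp [List.count_append]; omega
        · rw [hinv c']; simp [List.count_append, Ne.symm hcc])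
      exact ⟨d', by rw [hd']; simp [hlt]⟩

-- pvOut is B's enumerate/slice formula: element j of s2 is decided by the prefix
-- (pre ++ s2)[:pre.length + j]
lemma pvOutEnum (t : List Char) : ∀ (s2 pre : List Char),
    pvOut t pre s2 = (PySem.List.enumerate s2 pre.length).map (fun p =>
      if PySem.Chars.count (PySem.List.slice (pre ++ s2) none (some p.1)) [p.2]
          < PySem.Chars.count t [p.2]
      then PySem.Chars.upperChar p.2 else p.2) := by
  intro s2
  induction s2 with
  | nil => intro pre; simp [pvOut, PySem.List.enumerate_nil]
  | cons c r ih =>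
    intro pre
    rw [PySem.List.enumerate_cons, List.map_cons]
    have hhead : (if PySem.Chars.count (PySem.List.slice (pre ++ c :: r) none
          (some ((pre.length : Nat) : Int))) [c] < PySem.Chars.count t [c]
        then PySem.Chars.upperChar c else c)
        = (if pre.count c < t.count c then PySem.Chars.upperChar c else c) := by
      rw [PySem.List.slice_to_natCast, List.take_left, pvCountSingleton, pvCountSingleton]
    have htail : pvOut t (pre ++ [c]) r
        = (PySem.List.enumerate r (((pre.length : Nat) : Int) + 1)).map (fun p =>
          if PySem.Chars.count (PySem.List.slice (pre ++ c :: r) none (some p.1)) [p.2]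
              < PySem.Chars.count t [p.2]
          then PySem.Chars.upperChar p.2 else p.2) := by
      rw [ih (pre ++ [c])]
      simp [List.append_assoc]
    rw [pvOut, hhead, htail]

-- ===== VERDICT (by name: the statement is the Claim_ definition above) =====
theorem is_constructable2_spec : Claim_equal_is_constructable2 := by
  intro target source _ hpre
  unfold Spec_is_constructable2 is_constructable2 is_constructable2_alt
  by_cases hcon : ∀ c ∈ target.toList, ¬ (source.toList.count c < target.toList.count c)
  · have hA : pvIsConstructable target.toList source.toList = true :=
      (pvIsConstructableIff _ _).mpr hcon
    have hB : (target.toList.any (fun c =>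
        PySem.Chars.count source.toList [c] < PySem.Chars.count target.toList [c])) = false := by
      simp only [pvCountSingleton, List.any_eq_false, decide_eq_true_eq]
      exact hcon
    rw [hA, hB]
    simp only [Bool.not_true, Bool.false_eq_true, if_false]
    have hLow : ∀ c ∈ target.toList, 'a' ≤ c ∧ c ≤ 'z' := by
      have h1 : (target.toList.all fun c =>
          !(decide (source.toList.count c < target.toList.count c))) = true := by
        simp only [List.all_eq_true, Bool.not_eq_eq_eq_not, Bool.not_true,
          decide_eq_false_iff_not]
        exact hcon
      simpa only [List.all_eq_true, Bool.and_eq_true, decide_eq_true_eq] using hpre h1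
    obtain ⟨d', hd'⟩ := pvLoopOut target.toList hLow source.toList [] []
      ((target.toList.foldl (fun d c => d.insert c (d.getD c 0 + 1))
        (source.toList.foldl (fun d c => d.insert c 0)
          (target.toList.foldl (fun d c => d.insert c 0)
            (PySem.Dict.empty : PySem.Dict Char Int)))))
      (fun c => by rw [pvNeedA]; simp only [List.count_nil, Nat.cast_zero]; omega)
    rw [hd']
    have h2 := pvOutEnum target.toList source.toList []
    simp only [List.length_nil, Nat.cast_zero, List.nil_append] at h2
    exact congrArg (fun l => (some (String.ofList l) : Option String)) h2
  · have hA : pvIsConstructable target.toList source.toList = false := by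
      by_contra h
      exact hcon ((pvIsConstructableIff _ _).mp (by revert h; cases pvIsConstructable target.toList source.toList <;> simp))
    have hB : (target.toList.any (fun c =>
        PySem.Chars.count source.toList [c] < PySem.Chars.count target.toList [c])) = true := by
      simp only [pvCountSingleton, List.any_eq_true]
      rw [not_forall] at hcon
      simp only [not_forall, not_not, exists_prop] at hcon
      obtain ⟨c, hc, hlt⟩ := hcon
      exact ⟨c, hc, by simpa using hlt⟩
    rw [hA, hB]
    simp
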